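-- pv_equiv track=rewrite | github.com/redb0/tf-generator | service.py | only_one_true
-- ===== SOURCE A (Python) =====
-- from typing import List, Tuple
--
-- def only_one_true(x: List[bool]) -> Tuple[bool, int]:
--     for i in range(len(x)):
--         if x[i]:
--             if not any(x[i+1:]):
--                 return True, i
--             else:
--                 return False, -1
--     return False, -1
-- ===== SOURCE B (Python) =====
-- from typing import List, Tuple
--
-- def only_one_true(x: List[bool]) -> Tuple[bool, int]:
--     if sum(x) == 1:
--         return True, x.index(True)
--     return False, -1
-- ===== Notes on version B (the rewrite author's own statement) =====
-- stated objective: idiomatic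
-- what changed: Replaces A's index loop with its nested short-circuit any() scan over the remaining slice by a count-first pass (sum) followed by a separate first-index lookup only when the count is exactly one.
import Mathlib
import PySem

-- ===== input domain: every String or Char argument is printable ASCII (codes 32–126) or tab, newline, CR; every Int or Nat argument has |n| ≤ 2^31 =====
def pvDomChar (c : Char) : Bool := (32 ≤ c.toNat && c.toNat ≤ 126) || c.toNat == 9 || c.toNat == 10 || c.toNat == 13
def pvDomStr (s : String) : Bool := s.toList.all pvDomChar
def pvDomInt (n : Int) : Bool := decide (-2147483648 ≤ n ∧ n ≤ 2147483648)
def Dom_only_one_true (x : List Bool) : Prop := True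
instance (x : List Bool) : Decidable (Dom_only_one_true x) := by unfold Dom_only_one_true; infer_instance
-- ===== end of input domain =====

-- B replaces A's scan-then-any loop by counting the trues first, then (only when the
-- count is exactly one) a separate first-index lookup — more idiomatic, same O(n) cost.

-- ===== PORT A =====
-- for i in range(len(x)): if x[i]: return (True,i) if not any(x[i+1:]) else (False,-1)
def only_one_true_go (x : List Bool) (i : Nat) : Bool × Int :=
  if h : i < x.length then
    if x[i] then
      if !((PySem.List.slice x (some ((i : Int) + 1)) none).any id) then (true, (i : Int))
      else (false, -1)
    else only_one_true_go x (i + 1)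
  else (false, -1)
termination_by x.length - i

def only_one_true (x : List Bool) : Bool × Int := only_one_true_go x 0

-- ===== PORT B =====
-- sum(x): Python sums the bools as 0/1 ints
def only_one_true_alt (x : List Bool) : Bool × Int :=
  if (x.map (fun b => if b then (1 : Int) else 0)).sum = 1 then
    -- x.index(True): count = 1 guarantees membership, so getD is never the default
    (true, ((PySem.List.index? x true).getD 0 : Nat))
  else (false, -1)

-- ===== PRECONDITION & SPEC =====
def Spec_only_one_true (x : List Bool) (out : Bool × Int) : Prop := out = only_one_true_alt x
instance (x : List Bool) (out : Bool × Int) : Decidable (Spec_only_one_true x out) := by unfold Spec_only_one_true; infer_instance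

-- ===== CLAIM (what is proved, stated in full; the proofs are below) =====
def Claim_equal_only_one_true : Prop := ∀ (x : List Bool), Dom_only_one_true x → Spec_only_one_true x (only_one_true x)

-- ===== LEMMAS AND PROOFS =====

-- structural restatement of A's loop over the suffix
def only_one_true_goL : List Bool → Nat → Bool × Int
  | [], _ => (false, -1)
  | b :: t, i =>
    if b then
      if !(t.any id) then (true, (i : Int)) else (false, -1)
    else only_one_true_goL t (i + 1)

lemma go_eq_goL (x : List Bool) (i : Nat) :
    only_one_true_go x i = only_one_true_goL (x.drop i) i := by
  induction' hn : x.length - i using Nat.strong_induction_on with n ih generalizing i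
  unfold only_one_true_go
  by_cases h : i < x.length
  · have hd : x.drop i = x[i] :: x.drop (i + 1) := List.drop_eq_getElem_cons h
    have hs : PySem.List.slice x (some ((i : Int) + 1)) none = x.drop (i + 1) := by
      have := PySem.List.slice_from_natCast x (i + 1)
      simpa using this
    rw [hd]
    simp only [h, dif_pos, hs, only_one_true_goL]
    by_cases hb : x[i] = true
    · simp [hb]
    · simp only [Bool.not_eq_true] at hb
      simp only [hb]
      exact ih (x.length - (i + 1)) (by omega) (i + 1) rfl
  · simp only [h, dif_neg, not_false_iff]
    rw [List.drop_eq_nil_of_le (by omega)]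
    rfl

lemma sum_eq_count (l : List Bool) :
    (l.map (fun b => if b then (1 : Int) else 0)).sum = (l.count true : Int) := by
  induction l with
  | nil => simp
  | cons b t ih => cases b <;> simp [List.count_cons, ih] <;> omega

lemma goL_spec (l : List Bool) (i : Nat) :
    only_one_true_goL l i =
      if l.count true = 1 then (true, ((i + (PySem.List.index? l true).getD 0 : Nat) : Int))
      else (false, -1) := by
  induction l generalizing i with
  | nil => simp [only_one_true_goL]
  | cons b t ih =>
    cases b with
    | true =>
      have hidx : PySem.List.index? (true :: t) true = some 0 :=
        PySem.List.index?_cons_self true t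
      by_cases ha : t.any id
      · have : 0 < t.count true := by
          rcases List.any_eq_true.mp ha with ⟨c, hc, hid⟩
          have : c = true := by simpa using hid
          subst this
          exact List.count_pos_iff.mpr hc
        simp [only_one_true_goL, ha, List.count_cons]
        omega
      · have hc0 : t.count true = 0 := by
          by_contra h0
          have : true ∈ t := List.count_pos_iff.mp (Nat.pos_of_ne_zero h0)
          exact absurd (List.any_eq_true.mpr ⟨true, this, rfl⟩) ha
        simp [only_one_true_goL, ha, hc0]
    | false =>
      have hidx : PySem.List.index? (false :: t) true = (PySem.List.index? t true).map (· + 1) :=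
        PySem.List.index?_cons_of_ne t (by simp)
      rw [only_one_true_goL, if_neg (by simp)]
      rw [ih (i + 1)]
      simp only [List.count_cons, hidx]
      by_cases hc : t.count true = 1
      · have hmem : true ∈ t := List.count_pos_iff.mp (by omega)
        have h := (PySem.List.index?_isSome_iff t true).mpr hmem
        rcases Option.isSome_iff_exists.mp h with ⟨k, hk⟩
        have hk' : List.idxOf? true t = some k := by
          rwa [PySem.List.index?_eq_idxOf?] at hk
        simp [hc, hk']
        ring
      · simp [hc]

-- ===== VERDICT (by name: the statement is the Claim_ definition above) =====
theorem only_one_true_spec : Claim_equal_only_one_true := by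
  intro x _
  show only_one_true x = only_one_true_alt x
  rw [only_one_true, go_eq_goL, List.drop_zero, goL_spec, only_one_true_alt, sum_eq_count]
  by_cases hc : x.count true = 1
  · simp [hc]
  · simp [hc, (by exact_mod_cast hc : ¬((x.count true : Int) = 1))]
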